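-- pv_equiv track=rewrite | github.com/CarlRazmus/AdventOfCode2023 | day_14.py | get_biggest_position
-- ===== SOURCE A (Python) =====
-- def get_biggest_position(i, possible_pos, square_stones):
--
--     if len(square_stones) == 0 or i > square_stones[-1]:
--         return possible_pos
--
--     idx = len(square_stones) - 1
--     for square_stone in reversed(square_stones[:-1]):
--         if i > square_stone:
--             return min(square_stones[idx] - 1, possible_pos)
--         idx -= 1
--     return min(square_stones[0] - 1, possible_pos)
-- ===== SOURCE B (Python) =====
-- def get_biggest_position(i, possible_pos, square_stones):
--     if not square_stones or i > square_stones[-1]: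
--         return possible_pos
--     ans = square_stones[0]
--     for prev, nxt in zip(square_stones, square_stones[1:]):
--         if prev < i:
--             ans = nxt
--     return min(ans - 1, possible_pos)
-- ===== Notes on version B (the rewrite author's own statement) =====
-- stated objective: simpler
-- what changed: Replaces the reversed-slice backward scan with decrementing index bookkeeping and early returns by a single forward pass over adjacent pairs keeping the last successor of a stone below i.
import Mathlib
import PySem

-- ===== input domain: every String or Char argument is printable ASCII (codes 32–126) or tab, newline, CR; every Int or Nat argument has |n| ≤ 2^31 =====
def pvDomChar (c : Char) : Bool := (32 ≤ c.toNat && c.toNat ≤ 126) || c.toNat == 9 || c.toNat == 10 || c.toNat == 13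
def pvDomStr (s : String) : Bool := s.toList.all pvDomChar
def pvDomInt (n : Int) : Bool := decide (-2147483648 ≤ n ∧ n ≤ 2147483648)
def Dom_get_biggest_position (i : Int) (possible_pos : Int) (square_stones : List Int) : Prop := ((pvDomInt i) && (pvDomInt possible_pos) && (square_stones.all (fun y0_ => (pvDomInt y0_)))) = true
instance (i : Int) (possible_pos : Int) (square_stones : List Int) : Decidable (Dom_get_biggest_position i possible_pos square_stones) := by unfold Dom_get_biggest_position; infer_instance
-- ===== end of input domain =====

-- B replaces A's reversed-slice backward scan (with decrementing index bookkeeping and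
-- early returns) by a single forward pass over adjacent pairs; same O(n), simpler.

-- ===== PORT A =====
-- the for-loop over reversed(square_stones[:-1]) with the running idx and early returns
def gbpLoop (i : Int) (possible_pos : Int) (square_stones : List Int) :
    List Int → Int → Int
  | [], _ => min (PySem.List.pyGetD square_stones 0 0 - 1) possible_pos
  | square_stone :: rest, idx =>
      if i > square_stone then min (PySem.List.pyGetD square_stones idx 0 - 1) possible_pos
      else gbpLoop i possible_pos square_stones rest (idx - 1)

def get_biggest_position (i : Int) (possible_pos : Int) (square_stones : List Int) : Int :=
  if square_stones.length = 0 ∨ i > PySem.List.pyGetD square_stones (-1) 0 then possible_pos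
  else gbpLoop i possible_pos square_stones
        (PySem.List.slice square_stones none (some (-1))).reverse
        ((square_stones.length : Int) - 1)

-- ===== PORT B =====
def get_biggest_position_alt (i : Int) (possible_pos : Int) (square_stones : List Int) : Int :=
  match square_stones with
  | [] => possible_pos
  | s0 :: _ =>
      if i > PySem.List.pyGetD square_stones (-1) 0 then possible_pos
      else
        let ans := (List.zip square_stones (PySem.List.slice square_stones (some 1) none)).foldl
          (fun ans p => if p.1 < i then p.2 else ans) s0
        min (ans - 1) possible_pos

-- ===== PRECONDITION & SPEC =====
def Spec_get_biggest_position (i : Int) (possible_pos : Int) (square_stones : List Int) (out : Int) : Prop := out = get_biggest_position_alt i possible_pos square_stones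
instance (i : Int) (possible_pos : Int) (square_stones : List Int) (out : Int) : Decidable (Spec_get_biggest_position i possible_pos square_stones out) := by unfold Spec_get_biggest_position; infer_instance

-- ===== CLAIM (what is proved, stated in full; the proofs are below) =====
def Claim_equal_get_biggest_position : Prop := ∀ (i : Int) (possible_pos : Int) (square_stones : List Int), Dom_get_biggest_position i possible_pos square_stones → Spec_get_biggest_position i possible_pos square_stones (get_biggest_position i possible_pos square_stones)

-- ===== LEMMAS AND PROOFS =====

-- proof-only helper: first pair (p, q) with p < i in a list of adjacent pairs, yielding q
def pickR (i : Int) : List (Int × Int) → Int → Int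
  | [], s0 => s0
  | p :: rest, s0 => if p.1 < i then p.2 else pickR i rest s0

theorem pickR_append (i : Int) (r : List (Int × Int)) (p : Int × Int) (s0 : Int) :
    pickR i (r ++ [p]) s0 = pickR i r (if p.1 < i then p.2 else s0) := by
  induction r with
  | nil => simp [pickR]
  | cons q r ih => simp [pickR, ih]

theorem foldl_eq_pickR (i : Int) (ps : List (Int × Int)) (s0 : Int) :
    ps.foldl (fun ans p => if p.1 < i then p.2 else ans) s0 = pickR i ps.reverse s0 := by
  induction ps generalizing s0 with
  | nil => simp [pickR]
  | cons p ps ih => simp [List.foldl_cons, ih, pickR_append]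

theorem gbpLoop_eq_pickR (i pp : Int) (ss : List Int) (k : Nat) (hk : k < ss.length) :
    gbpLoop i pp ss ((ss.take k).reverse) (k : Int)
      = min (pickR i (((ss.zip (ss.drop 1)).take k).reverse) (PySem.List.pyGetD ss 0 0) - 1) pp := by
  induction k with
  | zero => simp [gbpLoop, pickR]
  | succ k ih =>
    have hk' : k < ss.length := Nat.lt_of_succ_lt hk
    have hz : k < (ss.zip (ss.drop 1)).length := by
      simp [List.length_zip]
      omega
    rw [List.take_add_one, List.getElem?_eq_getElem hk', List.take_add_one,
        List.getElem?_eq_getElem hz]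
    simp only [Option.toList_some, List.reverse_append, List.reverse_singleton,
      List.singleton_append, gbpLoop, pickR]
    push_cast
    have hget : ss[k] = (ss.zip (ss.drop 1))[k].1 := by
      simp [List.getElem_zip]
    by_cases h : i > ss[k]
    · have h2 : (ss.zip (ss.drop 1))[k].1 < i := by rw [← hget]; exact h
      rw [if_pos h, if_pos h2]
      have hsnd : (ss.zip (ss.drop 1))[k].2 = ss[k+1] := by
        simp [List.getElem_zip]
      rw [hsnd]
      have hc : PySem.List.pyGetD ss ((k : Int) + 1) 0 = ss[k+1] := by
        rw [show ((k : Int) + 1) = ((k + 1 : Nat) : Int) by push_cast; ring,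
            PySem.List.pyGetD_natCast,
            List.getD_eq_getElem?_getD, List.getElem?_eq_getElem hk]
        rfl
      rw [hc]
    · have h2 : ¬ (ss.zip (ss.drop 1))[k].1 < i := by rw [← hget]; exact h
      rw [if_neg h, if_neg h2]
      have hc : (k : Int) + 1 - 1 = (k : Int) := by ring
      rw [hc, ih hk']

theorem get_biggest_position_eq (i pp : Int) (ss : List Int) :
    get_biggest_position i pp ss = get_biggest_position_alt i pp ss := by
  match ss with
  | [] => simp [get_biggest_position, get_biggest_position_alt]
  | s0 :: tl =>
    simp only [get_biggest_position, get_biggest_position_alt]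
    by_cases hg : i > PySem.List.pyGetD (s0 :: tl) (-1) 0
    · simp [hg]
    · rw [if_neg (by simp [hg]), if_neg hg]
      set ss := s0 :: tl with hss
      have hlen : 0 < ss.length := by simp [hss]
      have hdl : PySem.List.slice ss none (some (-1)) = ss.take (ss.length - 1) := by
        rw [PySem.List.slice_to_neg_one, List.dropLast_eq_take]
      have hcast : (ss.length : Int) - 1 = ((ss.length - 1 : Nat) : Int) := by omega
      rw [hdl, hcast, gbpLoop_eq_pickR i pp ss (ss.length - 1) (by omega)]
      have htake : (ss.zip (ss.drop 1)).take (ss.length - 1) = ss.zip (ss.drop 1) := by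
        apply List.take_of_length_le
        simp [List.length_zip]
      rw [htake, ← foldl_eq_pickR]
      have h1 : PySem.List.slice ss (some 1) none = ss.drop 1 := by
        rw [PySem.List.slice_from_one, List.drop_one]
      have h0 : PySem.List.pyGetD ss 0 0 = s0 := by
        rw [hss]; exact PySem.List.pyGetD_zero_cons _ _ _
      rw [h1, h0]

-- ===== VERDICT (by name: the statement is the Claim_ definition above) =====
theorem get_biggest_position_spec : Claim_equal_get_biggest_position := by
  intro i pp ss _
  unfold Spec_get_biggest_position
  exact get_biggest_position_eq i pp ss
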